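-- pv_equiv track=rewrite | github.com/824zzy/Leetcode | R_BitManipulation/Basic/2317_Maximum_XOR_After_Operations_L1.py | maximumXOR
-- ===== SOURCE A (Python) =====
-- from typing import List
--
-- def maximumXOR(A: List[int]) -> int:
--     ans = 0
--     for i in range(32):
--         f = False
--         for x in A:
--             if (x>>i)&1: f = True
--         if f: ans += 1<<i
--     return ans
-- ===== SOURCE B (Python) =====
-- from typing import List
--
-- def maximumXOR(A: List[int]) -> int:
--     # max XOR after operations = OR of all elements, masked to 32 bits
--     acc = 0
--     for x in A:
--         acc |= x
--     return acc & 0xFFFFFFFF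
-- ===== Notes on version B (the rewrite author's own statement) =====
-- stated objective: faster
-- what changed: replaces the 32-pass per-bit scan (for each bit, scan the whole list) by a single OR-reduction pass followed by one 32-bit mask
import Mathlib
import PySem

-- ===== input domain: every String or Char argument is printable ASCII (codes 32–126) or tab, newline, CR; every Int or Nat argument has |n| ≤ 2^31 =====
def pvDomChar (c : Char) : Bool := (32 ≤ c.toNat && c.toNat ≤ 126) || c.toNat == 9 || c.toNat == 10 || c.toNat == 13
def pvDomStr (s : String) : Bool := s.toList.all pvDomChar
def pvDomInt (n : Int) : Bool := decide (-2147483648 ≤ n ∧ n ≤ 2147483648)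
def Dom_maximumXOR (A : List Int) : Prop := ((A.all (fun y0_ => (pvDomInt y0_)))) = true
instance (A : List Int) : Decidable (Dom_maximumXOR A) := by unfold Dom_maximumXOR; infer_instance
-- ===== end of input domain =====

-- B replaces A's 32 passes (one per bit) by a single OR-reduction pass plus one 32-bit mask (objective: faster).

-- ===== PORT A =====
def maximumXOR (A : List Int) : Int :=
  (List.range 32).foldl (fun ans (i : Nat) =>
    let f := A.foldl (fun f (x : Int) => if PySem.Int.band (x >>> i) 1 = 1 then true else f) false
    if f then ans + ((1 : Int) <<< i) else ans) 0

-- ===== PORT B =====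
def maximumXOR_alt (A : List Int) : Int :=
  PySem.Int.band (A.foldl (fun acc x => PySem.Int.bor acc x) 0) 4294967295

-- ===== PRECONDITION & SPEC =====
def Spec_maximumXOR (A : List Int) (out : Int) : Prop := out = maximumXOR_alt A
instance (A : List Int) (out : Int) : Decidable (Spec_maximumXOR A out) := by unfold Spec_maximumXOR; infer_instance

-- ===== CLAIM (what is proved, stated in full; the proofs are below) =====
def Claim_equal_maximumXOR : Prop := ∀ (A : List Int), Dom_maximumXOR A → Spec_maximumXOR A (maximumXOR A)

-- ===== LEMMAS AND PROOFS =====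

theorem mod_two_eq_toNat_testBit (x : Nat) : x % 2 = (x.testBit 0).toNat := by
  rcases Nat.mod_two_eq_zero_or_one x with h | h <;>
    simp [Nat.testBit_eq_decide_div_mod_eq, h]

theorem ldiff_div_two (n m : Nat) : (Nat.ldiff n m) / 2 = Nat.ldiff (n / 2) (m / 2) := by
  apply Nat.eq_of_testBit_eq
  intro i
  simp [Nat.testBit_div_two, Nat.testBit_ldiff]

theorem and_mod_two (n m : Nat) : ((n &&& m) % 2 = 1) ↔ (n % 2 = 1 ∧ m % 2 = 1) := by
  have h := Nat.testBit_and n m 0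
  simp only [Nat.testBit_eq_decide_div_mod_eq, pow_zero, Nat.div_one] at h
  simpa using h

theorem ldiff_mod_two (n m : Nat) : ((Nat.ldiff n m) % 2 = 1) ↔ (n % 2 = 1 ∧ ¬ m % 2 = 1) := by
  have h := Nat.testBit_ldiff n m 0
  simp only [Nat.testBit_eq_decide_div_mod_eq, pow_zero, Nat.div_one] at h
  by_cases hb : n % 2 = 1 <;> by_cases hc : m % 2 = 1 <;>
    simp [hb, hc] at h ⊢ <;> simp [h]

theorem sub_and_eq_ldiff : ∀ (n : Nat), ∀ (m : Nat), n - (n &&& m) = Nat.ldiff n m := by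
  intro n
  induction n using Nat.strong_induction_on with
  | _ n ih =>
    intro m
    rcases Nat.eq_zero_or_pos n with h0 | h0
    · subst h0
      apply Nat.eq_of_testBit_eq
      intro i
      simp [Nat.testBit_ldiff, Nat.zero_and]
    · have hih := ih (n / 2) (by omega) (m / 2)
      have hand_div : (n &&& m) / 2 = n / 2 &&& m / 2 := Nat.and_div_two
      have hld_div : (Nat.ldiff n m) / 2 = Nat.ldiff (n / 2) (m / 2) := ldiff_div_two n m
      have h1 := and_mod_two n m
      have h2 := ldiff_mod_two n m
      have hb1 : (n &&& m) % 2 < 2 := Nat.mod_lt _ (by norm_num)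
      have hb2 : (Nat.ldiff n m) % 2 < 2 := Nat.mod_lt _ (by norm_num)
      have hle : n / 2 &&& m / 2 ≤ n / 2 := Nat.and_le_left
      omega

theorem band_eq_land : ∀ (a b : Int), PySem.Int.band a b = Int.land a b := by
  intro a b
  cases a with
  | ofNat m =>
    cases b with
    | ofNat n =>
      show PySem.Int.band (m : Int) (n : Int) = Int.land (Int.ofNat m) (Int.ofNat n)
      rw [PySem.Int.band_natCast]
      rfl
    | negSucc n =>
      show PySem.Int.band (m : Int) (Int.negSucc n) = _
      rw [PySem.Int.band]
      have h1 : (0 : Int) ≤ (m : Int) := Int.natCast_nonneg m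
      have h2 : ¬ (0 : Int) ≤ Int.negSucc n := by omega
      simp only [h1, h2, if_true, if_false]
      have h3 : (-(Int.negSucc n) - 1).toNat = n := by
        simp [Int.negSucc_eq]
      have h4 : ((m : Int)).toNat = m := rfl
      rw [h3, h4, sub_and_eq_ldiff]
      rfl
  | negSucc m =>
    cases b with
    | ofNat n =>
      show PySem.Int.band (Int.negSucc m) (n : Int) = _
      rw [PySem.Int.band]
      have h1 : ¬ (0 : Int) ≤ Int.negSucc m := by omega
      have h2 : (0 : Int) ≤ (n : Int) := Int.natCast_nonneg n
      simp only [h1, h2, if_true, if_false]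
      have h3 : (-(Int.negSucc m) - 1).toNat = m := by
        simp [Int.negSucc_eq]
      have h4 : ((n : Int)).toNat = n := rfl
      rw [h3, h4, sub_and_eq_ldiff]
      rfl
    | negSucc n =>
      show PySem.Int.band (Int.negSucc m) (Int.negSucc n) = _
      rw [PySem.Int.band]
      have h1 : ¬ (0 : Int) ≤ Int.negSucc m := by omega
      have h2 : ¬ (0 : Int) ≤ Int.negSucc n := by omega
      simp only [h1, h2, if_false]
      have h3 : (-(Int.negSucc m) - 1).toNat = m := by simp [Int.negSucc_eq]
      have h4 : (-(Int.negSucc n) - 1).toNat = n := by simp [Int.negSucc_eq]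
      rw [h3, h4]
      show -((m ||| n : Nat) : Int) - 1 = Int.negSucc (m ||| n)
      rw [Int.negSucc_eq]
      ring

theorem bor_eq_lor : ∀ (a b : Int), PySem.Int.bor a b = Int.lor a b := by
  intro a b
  cases a with
  | ofNat m =>
    cases b with
    | ofNat n =>
      show PySem.Int.bor (m : Int) (n : Int) = Int.lor (Int.ofNat m) (Int.ofNat n)
      rw [PySem.Int.bor_natCast]
      rfl
    | negSucc n =>
      show PySem.Int.bor (m : Int) (Int.negSucc n) = _
      rw [PySem.Int.bor]
      have h1 : (0 : Int) ≤ (m : Int) := Int.natCast_nonneg m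
      have h2 : ¬ (0 : Int) ≤ Int.negSucc n := by omega
      simp only [h1, h2, if_true, if_false]
      have h3 : (-(Int.negSucc n) - 1).toNat = n := by simp [Int.negSucc_eq]
      have h4 : ((m : Int)).toNat = m := rfl
      rw [h3, h4, sub_and_eq_ldiff]
      show -((Nat.ldiff n m : Nat) : Int) - 1 = Int.negSucc (Nat.ldiff n m)
      rw [Int.negSucc_eq]
      ring
  | negSucc m =>
    cases b with
    | ofNat n =>
      show PySem.Int.bor (Int.negSucc m) (n : Int) = _
      rw [PySem.Int.bor]
      have h1 : ¬ (0 : Int) ≤ Int.negSucc m := by omega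
      have h2 : (0 : Int) ≤ (n : Int) := Int.natCast_nonneg n
      simp only [h1, h2, if_true, if_false]
      have h3 : (-(Int.negSucc m) - 1).toNat = m := by simp [Int.negSucc_eq]
      have h4 : ((n : Int)).toNat = n := rfl
      rw [h3, h4, sub_and_eq_ldiff]
      show -((Nat.ldiff m n : Nat) : Int) - 1 = Int.negSucc (Nat.ldiff m n)
      rw [Int.negSucc_eq]
      ring
    | negSucc n =>
      show PySem.Int.bor (Int.negSucc m) (Int.negSucc n) = _
      rw [PySem.Int.bor]
      have h1 : ¬ (0 : Int) ≤ Int.negSucc m := by omega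
      have h2 : ¬ (0 : Int) ≤ Int.negSucc n := by omega
      simp only [h1, h2, if_false]
      have h3 : (-(Int.negSucc m) - 1).toNat = m := by simp [Int.negSucc_eq]
      have h4 : (-(Int.negSucc n) - 1).toNat = n := by simp [Int.negSucc_eq]
      rw [h3, h4]
      show -((m &&& n : Nat) : Int) - 1 = Int.negSucc (m &&& n)
      rw [Int.negSucc_eq]
      ring

-- A's inner-loop test "(x>>i)&1 == 1" is exactly Int.testBit
theorem band_shift_one (x : Int) (i : Nat) :
    (PySem.Int.band (x >>> i) 1 = 1) ↔ x.testBit i = true := by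
  rw [band_eq_land]
  cases x with
  | ofNat m =>
    show Int.land (Int.ofNat (m >>> i)) (Int.ofNat 1) = 1 ↔ _
    show ((m >>> i &&& 1 : Nat) : Int) = 1 ↔ _
    rw [Nat.and_one_is_mod]
    have : (m >>> i) % 2 = ((m >>> i).testBit 0).toNat := mod_two_eq_toNat_testBit _
    rw [this, Nat.testBit_shiftRight]
    show (((m.testBit (i + 0)).toNat : Nat) : Int) = 1 ↔ Int.testBit (Int.ofNat m) i = true
    have : Int.testBit (Int.ofNat m) i = m.testBit i := rfl
    rw [this]
    cases h : m.testBit (i + 0) <;> simp_all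
  | negSucc m =>
    show Int.land (Int.negSucc (m >>> i)) (Int.ofNat 1) = 1 ↔ _
    show ((Nat.ldiff 1 (m >>> i) : Nat) : Int) = 1 ↔ _
    rw [← sub_and_eq_ldiff, Nat.and_comm, Nat.and_one_is_mod]
    have hm : (m >>> i) % 2 = ((m >>> i).testBit 0).toNat := mod_two_eq_toNat_testBit _
    rw [hm, Nat.testBit_shiftRight]
    have : Int.testBit (Int.negSucc m) i = ! m.testBit i := rfl
    rw [this]
    cases h : m.testBit (i + 0) <;> simp_all

-- A's inner loop is an "any"
theorem foldl_if_true (p : Int → Prop) [DecidablePred p] :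
    ∀ (A : List Int) (b : Bool),
      A.foldl (fun f x => if p x then true else f) b = (b || A.any (fun x => decide (p x))) := by
  intro A
  induction A with
  | nil => intro b; simp
  | cons x xs ih =>
    intro b
    simp only [List.foldl_cons, List.any_cons, ih]
    by_cases h : p x <;> simp [h]

-- bit i of the OR-reduction is "some element has bit i"
theorem testBit_foldl_lor :
    ∀ (A : List Int) (s : Int) (i : Nat),
      (A.foldl (fun acc x => Int.lor acc x) s).testBit i
        = (s.testBit i || A.any (fun x => x.testBit i)) := by
  intro A
  induction A with
  | nil => intro s i; simp
  | cons x xs ih =>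
    intro s i
    simp only [List.foldl_cons, List.any_cons, ih, Int.testBit_lor]
    rw [Bool.or_assoc]

theorem testBit_zero_int (i : Nat) : (0 : Int).testBit i = false := by
  show Nat.testBit 0 i = false
  simp

-- the per-bit accumulation over range k equals masking with 2^k - 1
theorem land_mask_zero (g : Int) : Int.land g ((( (2:Nat) ^ 0 - 1 : Nat)) : Int) = 0 := by
  cases g with
  | ofNat m => show ((m &&& 0 : Nat) : Int) = 0; simp
  | negSucc m =>
    show ((Nat.ldiff 0 m : Nat) : Int) = 0
    rw [← sub_and_eq_ldiff]
    simp [Nat.zero_and]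

theorem land_mask_succ (g : Int) (k : Nat) :
    Int.land g (((2 ^ (k+1) - 1 : Nat)) : Int)
      = Int.land g (((2 ^ k - 1 : Nat)) : Int) + (if g.testBit k then ((1:Int) <<< k) else 0) := by
  have hpow : (0:Nat) < 2 ^ k := Nat.two_pow_pos k
  have hshift : ((1:Int) <<< k) = ((2 ^ k : Nat) : Int) := by
    rw [Int.shiftLeft_eq]; push_cast; ring
  cases g with
  | ofNat m =>
    show ((m &&& (2 ^ (k+1) - 1) : Nat) : Int) = ((m &&& (2 ^ k - 1) : Nat) : Int) + _
    rw [Nat.and_two_pow_sub_one_eq_mod, Nat.and_two_pow_sub_one_eq_mod]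
    have hmm : m % (2 ^ k * 2) = m % 2 ^ k + 2 ^ k * (m / 2 ^ k % 2) := Nat.mod_mul
    have hb : Int.testBit (Int.ofNat m) k = m.testBit k := rfl
    have hbit : m.testBit k = decide (m / 2 ^ k % 2 = 1) := Nat.testBit_eq_decide_div_mod_eq
    rw [pow_succ, hb, hbit]
    rcases Nat.mod_two_eq_zero_or_one (m / 2 ^ k) with hp | hp <;>
      simp only [hp, Nat.mul_zero, Nat.mul_one, Nat.add_zero] at hmm <;> rw [hp]
    · norm_num
      exact_mod_cast hmm
    · norm_num
      rw [hshift]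
      exact_mod_cast hmm
  | negSucc m =>
    show ((Nat.ldiff (2 ^ (k+1) - 1) m : Nat) : Int) = ((Nat.ldiff (2 ^ k - 1) m : Nat) : Int) + _
    rw [← sub_and_eq_ldiff, ← sub_and_eq_ldiff, Nat.and_comm _ m, Nat.and_comm _ m,
      Nat.and_two_pow_sub_one_eq_mod, Nat.and_two_pow_sub_one_eq_mod]
    have hmm : m % (2 ^ k * 2) = m % 2 ^ k + 2 ^ k * (m / 2 ^ k % 2) := Nat.mod_mul
    have hm1 : m % 2 ^ k < 2 ^ k := Nat.mod_lt _ hpow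
    have hb : Int.testBit (Int.negSucc m) k = ! m.testBit k := rfl
    have hbit : m.testBit k = decide (m / 2 ^ k % 2 = 1) := Nat.testBit_eq_decide_div_mod_eq
    rw [pow_succ, hb, hbit]
    rcases Nat.mod_two_eq_zero_or_one (m / 2 ^ k) with hp | hp <;>
      simp only [hp, Nat.mul_zero, Nat.mul_one, Nat.add_zero] at hmm <;> rw [hp]
    · norm_num
      rw [hshift, ← Nat.cast_add, Nat.cast_inj]
      omega
    · norm_num
      omega

theorem range_fold_eq_mask (g : Int) :
    ∀ (k : Nat),
      (List.range k).foldl (fun ans i => if g.testBit i then ans + ((1:Int) <<< i) else ans) 0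
        = Int.land g (((2 ^ k - 1 : Nat)) : Int) := by
  intro k
  induction k with
  | zero => simpa using (land_mask_zero g).symm
  | succ k ih =>
    rw [List.range_succ, List.foldl_append, ih, List.foldl_cons, List.foldl_nil, land_mask_succ]
    by_cases h : g.testBit k = true <;> simp [h]

-- ===== VERDICT (by name: the statement is the Claim_ definition above) =====
theorem maximumXOR_spec : Claim_equal_maximumXOR := by
  intro A _
  unfold Spec_maximumXOR maximumXOR maximumXOR_alt
  -- rewrite B's fold to Int.lor and its mask to Int.land
  have hB : PySem.Int.band (A.foldl (fun acc x => PySem.Int.bor acc x) 0) 4294967295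
      = Int.land (A.foldl (fun acc x => Int.lor acc x) 0) (((2 ^ 32 - 1 : Nat)) : Int) := by
    rw [band_eq_land]
    have : A.foldl (fun acc x => PySem.Int.bor acc x) 0 = A.foldl (fun acc x => Int.lor acc x) 0 := by
      apply PySem.List.foldl_congr_mem
      intro a x _
      exact bor_eq_lor a x
    rw [this]
    norm_num
  rw [hB]
  set g : Int := A.foldl (fun acc x => Int.lor acc x) 0 with hg
  rw [← range_fold_eq_mask g 32]
  -- both sides are folds over range 32; show the step functions agree
  apply PySem.List.foldl_congr_mem
  intro ans i _
  have hf : A.foldl (fun f (x : Int) => if PySem.Int.band (x >>> i) 1 = 1 then true else f) false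
      = A.any (fun x => decide (PySem.Int.band (x >>> i) 1 = 1)) := by
    simpa using foldl_if_true (fun x => PySem.Int.band (x >>> i) 1 = 1) A false
  have hany : A.any (fun x => decide (PySem.Int.band (x >>> i) 1 = 1))
      = A.any (fun x => x.testBit i) := by
    have hfun : (fun x : Int => decide (PySem.Int.band (x >>> i) 1 = 1)) = fun x : Int => x.testBit i := by
      funext x
      cases h : x.testBit i
      · simp [(band_shift_one x i), h]
      · simp [(band_shift_one x i), h]
    rw [hfun]
  have hbit : A.any (fun x => x.testBit i) = g.testBit i := by
    rw [hg, testBit_foldl_lor A 0 i, testBit_zero_int]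
    simp
  simp only [hf, hany, hbit]
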